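-- pv_equiv track=rewrite | github.com/waldouribe/algorithms | moderate/frog_jump/frog_jump.py | jump_time
-- ===== SOURCE A (Python) =====
-- def jump_time(leaf, border, max_jump):
--     # Frog can cross in a single jump
--     if max_jump >= border:
--         return 0
--
--     position = 0
--
--     for t in range(0, len(leaf)):
--         # Frog can reach the border from current position
--         if position + max_jump >= border:
--             # Frog could reach the border the previous second
--             return t - 1
--         # Leaf closest to the border, and frog can jump
--         jump_distance = leaf[t] - position
--         if leaf[t] > position and jump_distance <= max_jump:
--             # Frog jumps
--             position = leaf[t]
--
--     return -1
-- ===== SOURCE B (Python) =====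
-- def jump_time(leaf, border, max_jump):
--     if max_jump >= border:
--         return 0
--     # Pass 1: frog's position at the START of each second (pre-jump).
--     positions = []
--     pos = 0
--     for x in leaf:
--         positions.append(pos)
--         if x > pos and x - pos <= max_jump:
--             pos = x
--     # Pass 2: first second from which the border is reachable.
--     for t, p in enumerate(positions):
--         if p + max_jump >= border:
--             return t - 1
--     return -1
-- ===== Notes on version B (the rewrite author's own statement) =====
-- stated objective: alternative
-- what changed: Split A's fused simulate-and-test loop into two passes: first build the list of pre-jump positions per second, then scan it for the first second from which the border is reachable.
import Mathlib
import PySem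

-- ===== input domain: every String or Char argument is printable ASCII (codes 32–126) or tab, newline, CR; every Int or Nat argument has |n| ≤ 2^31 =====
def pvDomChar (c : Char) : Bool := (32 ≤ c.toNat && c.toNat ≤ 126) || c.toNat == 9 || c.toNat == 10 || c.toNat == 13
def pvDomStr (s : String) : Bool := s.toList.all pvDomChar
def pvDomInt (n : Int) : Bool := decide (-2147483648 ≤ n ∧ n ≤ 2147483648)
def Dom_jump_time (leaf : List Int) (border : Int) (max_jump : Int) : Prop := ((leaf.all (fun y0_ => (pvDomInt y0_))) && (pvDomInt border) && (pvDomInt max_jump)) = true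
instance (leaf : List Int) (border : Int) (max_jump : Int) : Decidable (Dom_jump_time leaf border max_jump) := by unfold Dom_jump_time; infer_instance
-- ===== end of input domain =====

-- B re-decomposes A's fused simulate-and-test loop into two passes (build pre-jump positions, then scan); alternative structure, same cost.


-- ===== PORT A =====
-- A: single fused loop — check reachability, then maybe jump, per second
def jtLoopA (border max_jump : Int) : List Int → Int → Int → Int
  | [], _, _ => -1
  | x :: rest, pos, t =>
    if pos + max_jump ≥ border then t - 1
    else jtLoopA border max_jump rest (if x > pos ∧ x - pos ≤ max_jump then x else pos) (t + 1)

def jump_time (leaf : List Int) (border : Int) (max_jump : Int) : Int :=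
  if max_jump ≥ border then 0 else jtLoopA border max_jump leaf 0 0

-- ===== PORT B =====
-- B pass 1: list of pre-jump positions at the start of each second
def jtPositions (max_jump : Int) : List Int → Int → List Int
  | [], _ => []
  | x :: rest, pos =>
    pos :: jtPositions max_jump rest (if x > pos ∧ x - pos ≤ max_jump then x else pos)

-- B pass 2: first index t whose position can reach the border, returning t-1
def jtScan (border max_jump : Int) : List Int → Int → Int
  | [], _ => -1
  | p :: rest, t => if p + max_jump ≥ border then t - 1 else jtScan border max_jump rest (t + 1)

def jump_time_alt (leaf : List Int) (border : Int) (max_jump : Int) : Int :=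
  if max_jump ≥ border then 0 else jtScan border max_jump (jtPositions max_jump leaf 0) 0

-- ===== PRECONDITION & SPEC =====
def Spec_jump_time (leaf : List Int) (border : Int) (max_jump : Int) (out : Int) : Prop := out = jump_time_alt leaf border max_jump
instance (leaf : List Int) (border : Int) (max_jump : Int) (out : Int) : Decidable (Spec_jump_time leaf border max_jump out) := by unfold Spec_jump_time; infer_instance

-- ===== CLAIM (what is proved, stated in full; the proofs are below) =====
def Claim_equal_jump_time : Prop := ∀ (leaf : List Int) (border : Int) (max_jump : Int), Dom_jump_time leaf border max_jump → Spec_jump_time leaf border max_jump (jump_time leaf border max_jump)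

-- ===== LEMMAS AND PROOFS =====

-- ===== VERDICT (by name: the statement is the Claim_ definition above) =====
theorem jtLoop_eq (border max_jump : Int) (l : List Int) :
    ∀ pos t, jtLoopA border max_jump l pos t
      = jtScan border max_jump (jtPositions max_jump l pos) t := by
  induction l with
  | nil => intro pos t; rfl
  | cons x rest ih =>
    intro pos t
    simp only [jtLoopA, jtPositions, jtScan]
    split_ifs with h h2
    · rfl
    · exact ih _ _
    · exact ih _ _

theorem jump_time_spec : Claim_equal_jump_time := by
  intro leaf border max_jump _
  unfold Spec_jump_time jump_time jump_time_alt
  split_ifs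
  · rfl
  · exact jtLoop_eq border max_jump leaf 0 0
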